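-- pv_equiv track=rewrite | github.com/lukifer23/GemmaFischer | src/inference/chess_embeddings.py | _count_pawn_islands
-- ===== SOURCE A (Python) =====
-- from typing import List, Dict, Any, Optional, Tuple, Set
--
-- def _count_pawn_islands(pawn_files: List[int]) -> int:
--     """Count pawn islands in a list of pawn files."""
--     if not pawn_files:
--         return 0
--
--     sorted_files = sorted(set(pawn_files))
--     islands = 1
--
--     for i in range(1, len(sorted_files)):
--         if sorted_files[i] > sorted_files[i-1] + 1:
--             islands += 1
--
--     return islands
-- ===== SOURCE B (Python) =====
-- from typing import List
--
-- def _count_pawn_islands(pawn_files: List[int]) -> int: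
--     """Count pawn islands: one per element whose predecessor file is absent."""
--     s = set(pawn_files)
--     return sum(1 for f in s if (f - 1) not in s)
-- ===== Notes on version B (the rewrite author's own statement) =====
-- stated objective: simpler
-- what changed: Replaces sort-then-scan-adjacent-pairs with a single predecessor-membership count over the set: each maximal run of consecutive files has exactly one element f with f-1 absent, so no sorting and no index arithmetic is needed.
import Mathlib
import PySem

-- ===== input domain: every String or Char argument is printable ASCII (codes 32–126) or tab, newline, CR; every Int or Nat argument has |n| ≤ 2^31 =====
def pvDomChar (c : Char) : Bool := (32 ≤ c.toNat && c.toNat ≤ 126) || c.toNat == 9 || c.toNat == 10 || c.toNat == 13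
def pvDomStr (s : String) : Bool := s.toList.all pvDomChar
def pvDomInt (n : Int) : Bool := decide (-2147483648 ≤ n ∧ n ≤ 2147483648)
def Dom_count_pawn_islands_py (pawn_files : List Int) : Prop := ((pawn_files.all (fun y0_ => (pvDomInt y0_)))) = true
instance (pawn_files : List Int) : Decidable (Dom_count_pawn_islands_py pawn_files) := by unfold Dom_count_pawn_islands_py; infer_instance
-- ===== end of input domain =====

-- B replaces A's sort-then-adjacent-pair scan by counting set elements whose predecessor file is absent (simpler: no sort, no index arithmetic).


-- ===== PORT A =====
def count_pawn_islands_py (pawn_files : List Int) : Int :=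
  if pawn_files = [] then 0
  else
    let sorted_files := PySem.List.sorted (PySem.Set.ofList pawn_files) (fun x => x) false
    (PySem.List.pyRange 1 (PySem.List.len sorted_files) 1).foldl
      (fun islands i =>
        if PySem.List.pyGetD sorted_files i 0 > PySem.List.pyGetD sorted_files (i - 1) 0 + 1
        then islands + 1 else islands) 1

-- ===== PORT B =====
def count_pawn_islands_py_alt (pawn_files : List Int) : Int :=
  let s : PySem.Set Int := PySem.Set.ofList pawn_files
  s.foldl (fun acc f => acc + (if PySem.Set.contains s (f - 1) then 0 else 1)) 0

-- ===== PRECONDITION & SPEC =====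
def Spec_count_pawn_islands_py (pawn_files : List Int) (out : Int) : Prop := out = count_pawn_islands_py_alt pawn_files
instance (pawn_files : List Int) (out : Int) : Decidable (Spec_count_pawn_islands_py pawn_files out) := by unfold Spec_count_pawn_islands_py; infer_instance

-- ===== CLAIM (what is proved, stated in full; the proofs are below) =====
def Claim_equal_count_pawn_islands_py : Prop := ∀ (pawn_files : List Int), Dom_count_pawn_islands_py pawn_files → Spec_count_pawn_islands_py pawn_files (count_pawn_islands_py pawn_files)

-- ===== LEMMAS AND PROOFS =====

-- number of adjacent gaps (difference > 1) in a list, read left to right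
def pvGaps : List Int → Int
  | a :: b :: t => (if b > a + 1 then 1 else 0) + pvGaps (b :: t)
  | _ => 0

theorem pvGetD_cons_succ (a : Int) (t : List Int) (i : Int) (hi : 0 ≤ i) (d : Int) :
    PySem.List.pyGetD (a :: t) (i + 1) d = PySem.List.pyGetD t i d := by
  obtain ⟨n, rfl⟩ := Int.eq_ofNat_of_zero_le hi
  have h1 : ((n : Int) + 1) = ((n + 1 : Nat) : Int) := by push_cast; ring
  rw [h1, PySem.List.pyGetD_natCast, PySem.List.pyGetD_natCast]
  simp

-- A's indexed loop over range(1, len) computes pvGaps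
theorem pv_foldA (a : Int) (t : List Int) (c : Int) :
    (PySem.List.pyRange 1 (((a :: t).length : Int)) 1).foldl
      (fun islands i =>
        if PySem.List.pyGetD (a :: t) i 0 > PySem.List.pyGetD (a :: t) (i - 1) 0 + 1
        then islands + 1 else islands) c = c + pvGaps (a :: t) := by
  induction t generalizing a c with
  | nil =>
    rw [PySem.List.pyRange_one_eq_nil (by simp)]
    simp [pvGaps]
  | cons b t' ih =>
    have hm : (2 : Int) ≤ ((a :: b :: t').length : Int) := by simp; omega
    rw [PySem.List.pyRange_one_cons (by omega)]
    rw [List.foldl_cons]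
    have hshift : PySem.List.pyRange 2 ((a :: b :: t').length : Int) 1
        = (PySem.List.pyRange 1 (((b :: t').length : Int)) 1).map (fun i => i + 1) := by
      rw [PySem.List.pyRange_one, PySem.List.pyRange_one, List.map_map]
      have h2 : (((a :: b :: t').length : Int) - 2).toNat = (((b :: t').length : Int) - 1).toNat := by
        simp; omega
      rw [h2]
      apply List.map_congr_left
      intro k _
      simp [Function.comp]; ring
    have h12 : (1 : Int) + 1 = 2 := by norm_num
    rw [h12, hshift, List.foldl_map]
    have hbody : ∀ acc : Int, ∀ i ∈ PySem.List.pyRange 1 (((b :: t').length : Int)) 1,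
        (if PySem.List.pyGetD (a :: b :: t') (i + 1) 0 >
            PySem.List.pyGetD (a :: b :: t') (i + 1 - 1) 0 + 1 then acc + 1 else acc)
        = (if PySem.List.pyGetD (b :: t') i 0 > PySem.List.pyGetD (b :: t') (i - 1) 0 + 1
           then acc + 1 else acc) := by
      intro acc i hi
      rw [PySem.List.mem_pyRange_one] at hi
      have e1 : PySem.List.pyGetD (a :: b :: t') (i + 1) 0 = PySem.List.pyGetD (b :: t') i 0 :=
        pvGetD_cons_succ _ _ _ (by omega) _
      have e2 : PySem.List.pyGetD (a :: b :: t') (i + 1 - 1) 0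
          = PySem.List.pyGetD (b :: t') (i - 1) 0 := by
        have : i + 1 - 1 = (i - 1) + 1 := by ring
        rw [this]
        exact pvGetD_cons_succ _ _ _ (by omega) _
      rw [e1, e2]
    rw [PySem.List.foldl_congr_mem _ _ _ _ hbody]
    rw [ih]
    have ea : PySem.List.pyGetD (a :: b :: t') 1 0 = b := by
      have : (1 : Int) = ((1 : Nat) : Int) := by norm_num
      rw [this, PySem.List.pyGetD_natCast]; simp
    have eb : PySem.List.pyGetD (a :: b :: t') (1 - 1) 0 = a := by
      norm_num [PySem.List.pyGetD_zero_cons]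
    rw [ea, eb]
    show (if b > a + 1 then c + 1 else c) + pvGaps (b :: t')
        = c + ((if b > a + 1 then 1 else 0) + pvGaps (b :: t'))
    split_ifs <;> ring

-- B's fold over the set is a countP
theorem pv_foldB (p : Int → Bool) (l : List Int) (c : Int) :
    l.foldl (fun acc f => acc + (if p f then 0 else 1)) c = c + (l.countP (fun f => !p f) : Int) := by
  induction l generalizing c with
  | nil => simp
  | cons x t ih =>
    simp only [List.foldl_cons, List.countP_cons, ih]
    by_cases h : p x
    · simp [h]
    · simp [h]
      ring

-- key fact: on a strictly increasing nonempty list, the number of elements whose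
-- predecessor is absent is 1 + number of adjacent gaps
theorem pv_key (L : List Int) (hL : L.Pairwise (· < ·)) (hne : L ≠ []) :
    ((L.countP (fun f => !decide ((f - 1) ∈ L)) : Nat) : Int) = 1 + pvGaps L := by
  induction L with
  | nil => exact absurd rfl hne
  | cons a t ih =>
    match t, hL with
    | [], _ =>
      have : ¬ (a - 1 = a) := by omega
      simp [pvGaps, this]
    | b :: t', hL =>
      rw [List.pairwise_cons] at hL
      obtain ⟨ha, hbt⟩ := hL
      have hab : a < b := ha b (by simp)
      have hat' : ∀ x ∈ t', a < x := fun x hx => ha x (by simp [hx])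
      have hbt' : ∀ x ∈ t', b < x := by
        rw [List.pairwise_cons] at hbt
        exact hbt.1
      have hpa : (!decide ((a - 1) ∈ (a :: b :: t'))) = true := by
        simp only [Bool.not_eq_eq_eq_not, Bool.not_true, decide_eq_false_iff_not]
        intro h
        rcases List.mem_cons.mp h with h1 | h
        · omega
        · rcases List.mem_cons.mp h with h1 | h1
          · omega
          · have := hat' _ h1; omega
      have ht'congr : ∀ x ∈ (t' : List Int),
          (!decide ((x - 1) ∈ (a :: b :: t'))) = !decide ((x - 1) ∈ (b :: t')) := by
        intro x hx
        have hxb : b < x := hbt' x hx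
        simp only [List.mem_cons]
        have : ¬ (x - 1 = a) := by omega
        simp [this]
      have hmemb : decide ((b - 1) ∈ (a :: b :: t')) = decide (b = a + 1) := by
        by_cases h : b = a + 1
        · simp [h]
        · simp only [List.mem_cons]
          have h1 : ¬ (b - 1 = a) := by omega
          have h2 : ¬ (b - 1 = b) := by omega
          have h3 : ¬ (b - 1 ∈ t') := fun hm => by have := hbt' _ hm; omega
          simp [h, h1, h2, h3]
      have hmemb' : decide ((b - 1) ∈ (b :: t')) = false := by
        simp only [List.mem_cons]
        have h2 : ¬ (b - 1 = b) := by omega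
        have h3 : ¬ (b - 1 ∈ t') := fun hm => by have := hbt' _ hm; omega
        simp [h2, h3]
      have ihv := ih hbt (by simp)
      rw [List.countP_cons, hmemb'] at ihv
      simp only [Bool.not_false, if_true] at ihv
      push_cast at ihv
      rw [List.countP_cons, List.countP_cons, hpa, hmemb,
          List.countP_congr (fun x hx => by rw [ht'congr x hx])]
      simp only [if_true]
      rw [pvGaps]
      by_cases hb1 : b = a + 1
      · have h1 : (!decide (b = a + 1)) = false := by simp [hb1]
        have h2 : ¬ (b > a + 1) := by omega
        rw [h1, if_neg h2]
        simp only [Bool.false_eq_true, if_false]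
        push_cast
        omega
      · have h1 : (!decide (b = a + 1)) = true := by simp [hb1]
        have h2 : b > a + 1 := by omega
        rw [h1, if_pos h2]
        simp only [if_true]
        push_cast
        omega

theorem count_pawn_islands_py_spec' (pawn_files : List Int) :
    count_pawn_islands_py pawn_files = count_pawn_islands_py_alt pawn_files := by
  by_cases hxs : pawn_files = []
  · simp [count_pawn_islands_py, count_pawn_islands_py_alt, hxs]
  · unfold count_pawn_islands_py count_pawn_islands_py_alt
    rw [if_neg hxs]
    set S : PySem.Set Int := PySem.Set.ofList pawn_files with hS
    set L : List Int := PySem.List.sorted S (fun x => x) false with hLdef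
    have hperm : L.Perm S := PySem.List.sorted_perm _ _ _
    have hSne : S ≠ [] := by
      obtain ⟨x, xs', rfl⟩ := List.exists_cons_of_ne_nil hxs
      intro h
      have : x ∈ S := by rw [hS, PySem.Set.mem_ofList]; simp
      rw [h] at this; exact absurd this (List.not_mem_nil)
    have hLne : L ≠ [] := by
      intro h
      rw [h] at hperm; exact hSne (hperm.nil_eq.symm)
    obtain ⟨hd, tl, hLcons⟩ := List.exists_cons_of_ne_nil hLne
    have hA : (PySem.List.pyRange 1 (PySem.List.len L) 1).foldl
        (fun islands i =>
          if PySem.List.pyGetD L i 0 > PySem.List.pyGetD L (i - 1) 0 + 1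
          then islands + 1 else islands) 1 = 1 + pvGaps L := by
      rw [PySem.List.len_eq, hLcons]
      exact pv_foldA hd tl 1
    have hB : S.foldl (fun acc f => acc + (if PySem.Set.contains S (f - 1) then 0 else 1)) 0
        = 0 + (S.countP (fun f => !PySem.Set.contains S (f - 1)) : Int) :=
      pv_foldB _ _ _
    have hcongr1 : S.countP (fun f => !PySem.Set.contains S (f - 1))
        = S.countP (fun f => !decide ((f - 1) ∈ S)) := by
      apply List.countP_congr
      intro x _
      have hc : PySem.Set.contains S (x - 1) = decide ((x - 1) ∈ S) := by
        by_cases h : (x - 1) ∈ S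
        · rw [(PySem.Set.contains_iff S (x - 1)).mpr h, decide_eq_true h]
        · rw [Bool.eq_false_iff.mpr (fun hc => h ((PySem.Set.contains_iff S (x - 1)).mp hc)),
              decide_eq_false h]
      rw [hc]
    have hcongr2 : S.countP (fun f => !decide ((f - 1) ∈ S))
        = L.countP (fun f => !decide ((f - 1) ∈ L)) := by
      rw [← hperm.countP_eq]
      apply List.countP_congr
      intro x _
      by_cases h : (x - 1) ∈ S
      · rw [decide_eq_true h, decide_eq_true (hperm.mem_iff.mpr h)]
      · rw [decide_eq_false h, decide_eq_false (fun hl => h (hperm.mem_iff.mp hl))]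
    have hkey := pv_key L (PySem.List.sorted_ofList_pairwise_lt pawn_files) hLne
    rw [hA, hB, hcongr1, hcongr2, hkey]
    ring

-- ===== VERDICT (by name: the statement is the Claim_ definition above) =====
theorem count_pawn_islands_py_spec : Claim_equal_count_pawn_islands_py := by
  intro pawn_files _
  exact count_pawn_islands_py_spec' pawn_files
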